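-- pv_equiv track=rewrite | github.com/mto9902/SheetMusicGenerator | backend/app/generator/_texture.py | _motive_index_bounds
-- ===== SOURCE A (Python) =====
-- def _motive_index_bounds(steps: list[int], pool_length: int) -> tuple[int, int]:
--     cumulative = 0
--     low = 0
--     high = 0
--     for step in steps:
--         cumulative += int(step)
--         low = min(low, cumulative)
--         high = max(high, cumulative)
--     min_index = max(0, -low)
--     max_index = max(min_index, pool_length - 1 - high)
--     return min_index, max_index
-- ===== SOURCE B (Python) =====
-- def _motive_index_bounds(steps: list[int], pool_length: int) -> tuple[int, int]:
--     # Backward dynamic programming on suffixes: after processing a suffix,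
--     # low/high are the min/max over {0} and all prefix sums of that suffix,
--     # via the clamped recurrences low = min(0, s + low), high = max(0, s + high).
--     # No running cumulative sum is kept.
--     low = 0
--     high = 0
--     for step in reversed(steps):
--         s = int(step)
--         low = min(0, s + low)
--         high = max(0, s + high)
--     min_index = max(0, -low)
--     max_index = max(min_index, pool_length - 1 - high)
--     return min_index, max_index
-- ===== Notes on version B (the rewrite author's own statement) =====
-- stated objective: alternative
-- what changed: Replaces the forward scan that tracks a running cumulative sum and its running min/max by a backward dynamic programming over suffixes with the clamped recurrences low=min(0,s+low), high=max(0,s+high), which needs no cumulative variable.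
import Mathlib
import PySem

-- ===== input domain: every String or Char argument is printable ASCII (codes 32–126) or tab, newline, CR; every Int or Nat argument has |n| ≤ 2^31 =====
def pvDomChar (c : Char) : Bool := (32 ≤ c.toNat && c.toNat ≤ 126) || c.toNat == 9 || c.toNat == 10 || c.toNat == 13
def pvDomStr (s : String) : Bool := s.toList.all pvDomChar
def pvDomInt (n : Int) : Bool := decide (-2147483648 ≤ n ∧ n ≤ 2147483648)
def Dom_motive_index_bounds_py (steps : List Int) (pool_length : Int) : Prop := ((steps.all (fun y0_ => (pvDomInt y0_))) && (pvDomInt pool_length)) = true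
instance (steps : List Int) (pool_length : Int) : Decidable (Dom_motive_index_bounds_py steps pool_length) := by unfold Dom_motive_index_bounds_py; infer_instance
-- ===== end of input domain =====

-- B replaces the forward cumulative-sum scan by a backward suffix DP with clamped recurrences (alternative algorithm, same cost); return value only.


-- ===== PORT A =====
-- A's loop: one forward fold carrying (cumulative, low, high)
def pvAFold : List Int → Int × Int × Int → Int × Int × Int
  | [], s => s
  | step :: rest, (c, l, h) =>
      let c' := c + step          -- int(step) on an int is the identity
      pvAFold rest (c', min l c', max h c')

def motive_index_bounds_py (steps : List Int) (pool_length : Int) : Int × Int :=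
  let s := pvAFold steps (0, 0, 0)
  let low := s.2.1
  let high := s.2.2
  let min_index := max 0 (-low)
  let max_index := max min_index (pool_length - 1 - high)
  (min_index, max_index)

-- ===== PORT B =====
-- B: loop over reversed(steps) maintaining the clamped suffix extremes (low, high)
def motive_index_bounds_py_alt (steps : List Int) (pool_length : Int) : Int × Int :=
  let p := steps.reverse.foldl (fun (a : Int × Int) s => (min 0 (s + a.1), max 0 (s + a.2))) (0, 0)
  let min_index := max 0 (-p.1)
  let max_index := max min_index (pool_length - 1 - p.2)
  (min_index, max_index)

-- ===== PRECONDITION & SPEC =====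
def Spec_motive_index_bounds_py (steps : List Int) (pool_length : Int) (out : Int × Int) : Prop := out = motive_index_bounds_py_alt steps pool_length
instance (steps : List Int) (pool_length : Int) (out : Int × Int) : Decidable (Spec_motive_index_bounds_py steps pool_length out) := by unfold Spec_motive_index_bounds_py; infer_instance

-- ===== CLAIM (what is proved, stated in full; the proofs are below) =====
def Claim_equal_motive_index_bounds_py : Prop := ∀ (steps : List Int) (pool_length : Int), Dom_motive_index_bounds_py steps pool_length → Spec_motive_index_bounds_py steps pool_length (motive_index_bounds_py steps pool_length)

-- ===== LEMMAS AND PROOFS =====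
-- B's reversed loop as a right fold
def pvG (steps : List Int) : Int × Int :=
  steps.foldr (fun s a => (min 0 (s + a.1), max 0 (s + a.2))) (0, 0)

theorem pvG_cons (s : Int) (rest : List Int) :
    pvG (s :: rest) = (min 0 (s + (pvG rest).1), max 0 (s + (pvG rest).2)) := rfl

theorem pvG_bounds (steps : List Int) : (pvG steps).1 ≤ 0 ∧ 0 ≤ (pvG steps).2 := by
  cases steps with
  | nil => exact ⟨le_refl 0, le_refl 0⟩
  | cons s rest => exact ⟨min_le_left _ _, le_max_left _ _⟩

-- A's fused fold computes the backward-DP extremes, given the loop invariant l ≤ c ≤ h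
theorem pvAFold_eq_pvG (steps : List Int) : ∀ (c l h : Int), l ≤ c → c ≤ h →
    (pvAFold steps (c, l, h)).2.1 = min l (c + (pvG steps).1) ∧
    (pvAFold steps (c, l, h)).2.2 = max h (c + (pvG steps).2) := by
  induction steps with
  | nil =>
      intro c l h hl hh
      constructor
      · simp [pvAFold, pvG]; omega
      · simp [pvAFold, pvG]; omega
  | cons s rest ih =>
      intro c l h hl hh
      obtain ⟨gl, gh⟩ := pvG_bounds rest
      obtain ⟨ihl, ihh⟩ := ih (c + s) (min l (c + s)) (max h (c + s)) (min_le_right _ _) (le_max_right _ _)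
      constructor
      · rw [show pvAFold (s :: rest) (c, l, h) = pvAFold rest (c + s, min l (c + s), max h (c + s)) from rfl, ihl,
            pvG_cons]
        omega
      · rw [show pvAFold (s :: rest) (c, l, h) = pvAFold rest (c + s, min l (c + s), max h (c + s)) from rfl, ihh,
            pvG_cons]
        omega

-- ===== VERDICT (by name: the statement is the Claim_ definition above) =====
theorem motive_index_bounds_py_spec : Claim_equal_motive_index_bounds_py := by
  intro steps pool_length _
  unfold Spec_motive_index_bounds_py motive_index_bounds_py motive_index_bounds_py_alt
  have hfold : steps.reverse.foldl (fun (a : Int × Int) s => (min 0 (s + a.1), max 0 (s + a.2))) (0, 0) = pvG steps := by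
    rw [List.foldl_reverse]; rfl
  obtain ⟨hl, hh⟩ := pvAFold_eq_pvG steps 0 0 0 (le_refl 0) (le_refl 0)
  obtain ⟨gl, gh⟩ := pvG_bounds steps
  simp only [hfold, hl, hh, Prod.mk.injEq]
  constructor <;> omega
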